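-- pv_equiv track=rewrite | github.com/roflanpotsan/asvthw | task2_undefinedcoef.py | generate_boolean_permutations
-- ===== SOURCE A (Python) =====
-- def generate_boolean_permutations(n, row_vector):
--     variables = [f'x{i + 1}' for i in range(n)]
--     all_combinations = []
--
--     for i in range(1, 2 ** n):
--         combination = ''
--         combination_vals = ''
--         for j in range(n):
--             if i & (1 << j):
--
--                 combination += variables[j]
--                 combination_vals += row_vector[j]
--         all_combinations.append([combination, combination_vals])
--
--     # Sort by length and then lexically
--     all_combinations.sort(key=lambda x: (len(x[0]), x))
--     return all_combinations
-- ===== SOURCE B (Python) =====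
-- def generate_boolean_permutations(n, row_vector):
--     # Iterative subset doubling: after processing variable j, combos holds the
--     # labeled pairs for every non-empty subset of the first j+1 variables, in
--     # binary counting order; no bitmask testing.
--     combos = []
--     for j in range(n):
--         var = 'x' + str(j + 1)
--         val = row_vector[j]
--         combos = combos + [[var, val]] + [[c + var, v + val] for c, v in combos]
--     combos.sort(key=lambda x: (len(x[0]), x))
--     return combos
-- ===== Notes on version B (the rewrite author's own statement) =====
-- stated objective: alternative
-- what changed: Replaces the bitmask enumeration (outer loop over 2**n masks with an inner n-step bit-testing loop rebuilding each string from scratch) by an iterative subset-doubling construction that extends previously built pairs, with the same final sort.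
import Mathlib
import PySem

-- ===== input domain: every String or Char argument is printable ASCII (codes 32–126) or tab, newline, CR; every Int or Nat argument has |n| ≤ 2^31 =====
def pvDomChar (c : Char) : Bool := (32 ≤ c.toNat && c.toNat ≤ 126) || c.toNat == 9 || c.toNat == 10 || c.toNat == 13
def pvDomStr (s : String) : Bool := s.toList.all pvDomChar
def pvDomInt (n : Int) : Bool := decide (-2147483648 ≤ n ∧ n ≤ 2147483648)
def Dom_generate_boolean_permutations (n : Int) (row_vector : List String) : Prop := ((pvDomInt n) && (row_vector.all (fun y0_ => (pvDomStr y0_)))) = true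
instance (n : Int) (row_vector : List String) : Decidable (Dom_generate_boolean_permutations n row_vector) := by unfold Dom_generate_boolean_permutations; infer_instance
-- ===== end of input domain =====

-- B replaces A's bitmask enumeration (2^n masks, each rebuilt by an inner bit-testing loop)
-- with an iterative subset-doubling construction; same final sort, same return value.


-- ===== PORT A =====
-- '2 ** n' is ported as (2:Int)^n.toNat and '1 << j' as (1:Int) <<< j.toNat: exact for
-- n ≥ 0 (Pre_) and j ∈ range(n); for n < 0 Python's 2**n is a float and range raises.
def generate_boolean_permutations (n : Int) (row_vector : List String) : List (List String) :=
  let variables_ := (PySem.List.pyRange 0 n).map (fun i => "x" ++ PySem.Int.toStr (i + 1))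
  let all_combinations :=
    (PySem.List.pyRange 1 ((2:Int) ^ n.toNat)).foldl (fun acc i =>
      let p := (PySem.List.pyRange 0 n).foldl (fun (cv : String × String) j =>
        if PySem.Int.band i ((1:Int) <<< j.toNat) ≠ 0 then
          (cv.1 ++ PySem.List.pyGetD variables_ j "", cv.2 ++ PySem.List.pyGetD row_vector j "")
        else cv) ("", "")
      acc ++ [[p.1, p.2]]) []
  PySem.List.sorted2 all_combinations
    (fun x => PySem.Str.len (PySem.List.pyGetD x 0 "")) (fun x => x)

-- ===== PORT B =====
def generate_boolean_permutations_alt (n : Int) (row_vector : List String) : List (List String) :=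
  let combos := (PySem.List.pyRange 0 n).foldl (fun combos j =>
    let var := "x" ++ PySem.Int.toStr (j + 1)
    let val := PySem.List.pyGetD row_vector j ""
    combos ++ [[var, val]] ++ combos.map (fun p =>
      [PySem.List.pyGetD p 0 "" ++ var, PySem.List.pyGetD p 1 "" ++ val])) []
  PySem.List.sorted2 combos
    (fun x => PySem.Str.len (PySem.List.pyGetD x 0 "")) (fun x => x)

-- ===== PRECONDITION & SPEC =====
-- Python A returns normally iff 0 ≤ n (else 2**n is a float and range raises TypeError)
-- and n ≤ len(row_vector) (else row_vector[j] raises IndexError).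
def Pre_generate_boolean_permutations (n : Int) (row_vector : List String) : Prop :=
  0 ≤ n ∧ n ≤ (row_vector.length : Int)
instance (n : Int) (row_vector : List String) : Decidable (Pre_generate_boolean_permutations n row_vector) := by unfold Pre_generate_boolean_permutations; infer_instance
def pvWitness_generate_boolean_permutations : Int × List String := (2, ["0", "1"])
def Spec_generate_boolean_permutations (n : Int) (row_vector : List String) (out : List (List String)) : Prop := out = generate_boolean_permutations_alt n row_vector
instance (n : Int) (row_vector : List String) (out : List (List String)) : Decidable (Spec_generate_boolean_permutations n row_vector out) := by unfold Spec_generate_boolean_permutations; infer_instance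

-- ===== CLAIM (what is proved, stated in full; the proofs are below) =====
def Claim_equal_generate_boolean_permutations : Prop := ∀ (n : Int) (row_vector : List String), Dom_generate_boolean_permutations n row_vector → Pre_generate_boolean_permutations n row_vector → Spec_generate_boolean_permutations n row_vector (generate_boolean_permutations n row_vector)

-- ===== LEMMAS AND PROOFS =====

-- the variable name 'x{j+1}'
def pvVar (j : Int) : String := "x" ++ PySem.Int.toStr (j + 1)

-- A's inner-loop step, with the 'variables' lookup already resolved
def pvStep (rv : List String) (i : Int) (cv : String × String) (j : Int) : String × String :=
  if PySem.Int.band i ((1:Int) <<< j.toNat) ≠ 0 then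
    (cv.1 ++ pvVar j, cv.2 ++ PySem.List.pyGetD rv j "")
  else cv

-- A's inner loop for mask i (variable count N)
def pvG (rv : List String) (N : Nat) (i : Int) : String × String :=
  (PySem.List.pyRange 0 (N : Int)).foldl (pvStep rv i) ("", "")

-- the common pair list: all non-empty subsets of the first k variables, in counting order
def pvC (rv : List String) : Nat → List (String × String)
  | 0 => []
  | k + 1 => pvC rv k ++ [(pvVar k, PySem.List.pyGetD rv k "")]
      ++ (pvC rv k).map (fun p => (p.1 ++ pvVar k, p.2 ++ PySem.List.pyGetD rv k ""))

theorem pvBandNat (a c : Nat) :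
    PySem.Int.band (a : Int) ((1:Int) <<< c) = ((a &&& 2 ^ c : Nat) : Int) := by
  have h1 : (1:Int) <<< c = ((2 ^ c : Nat) : Int) := by
    rw [Int.shiftLeft_eq]; push_cast; ring
  rw [h1, PySem.Int.band_natCast]

theorem pvBandFalse (a c : Nat) (h : a.testBit c = false) :
    PySem.Int.band (a : Int) ((1:Int) <<< c) = 0 := by
  rw [pvBandNat, Nat.and_two_pow, h]; simp

theorem pvBandTrue (a c : Nat) (h : a.testBit c = true) :
    PySem.Int.band (a : Int) ((1:Int) <<< c) ≠ 0 := by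
  rw [pvBandNat, Nat.and_two_pow, h]
  simp

-- a fold in which no visited bit is set does nothing
theorem pvZeroFold (rv : List String) (i : Int) (l : List Int) (cv : String × String)
    (h : ∀ j ∈ l, PySem.Int.band i ((1:Int) <<< j.toNat) = 0) :
    l.foldl (pvStep rv i) cv = cv := by
  induction l generalizing cv with
  | nil => rfl
  | cons x xs ih =>
    have hx := h x (by simp)
    simp only [List.foldl_cons, pvStep, hx]
    simp only [ne_eq, not_true_eq_false]
    exact ih cv (fun j hj => h j (by simp [hj]))

-- bits at or above k of a < 2^k are clear, so the tail of the fold does nothing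
theorem pvHighZero (rv : List String) (a k : Nat) (m : Int) (ha : a < 2 ^ k)
    (cv : String × String) :
    (PySem.List.pyRange (k : Int) m).foldl (pvStep rv (a : Int)) cv = cv := by
  apply pvZeroFold
  intro j hj
  have hj' := (PySem.List.mem_pyRange_one.mp hj).1
  have hk : k ≤ j.toNat := by omega
  apply pvBandFalse
  exact Nat.testBit_lt_two_pow (lt_of_lt_of_le ha (Nat.pow_le_pow_right (by norm_num) hk))

-- for a < 2^k, the whole inner loop is its first k steps
theorem pvGRestrict (rv : List String) (N a k : Nat) (ha : a < 2 ^ k) (hk : k ≤ N) :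
    pvG rv N (a : Int) = (PySem.List.pyRange 0 (k : Int)).foldl (pvStep rv (a : Int)) ("", "") := by
  unfold pvG
  rw [PySem.List.pyRange_one_append 0 (k : Int) (N : Int) (by positivity) (by exact_mod_cast hk),
    List.foldl_append, pvHighZero rv a k _ ha]

theorem pvGZero (rv : List String) (N : Nat) : pvG rv N (0 : Int) = ("", "") := by
  have := pvGRestrict rv N 0 0 (by norm_num) (Nat.zero_le N)
  simpa [PySem.List.pyRange_one_eq_nil] using this

-- the key doubling identity: mask 2^k + m appends variable k to mask m's strings
theorem pvKey (rv : List String) (N m k : Nat) (hm : m < 2 ^ k) (hk : k < N) :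
    pvG rv N ((2:Int) ^ k + (m : Int)) =
      ((pvG rv N (m : Int)).1 ++ pvVar (k : Int),
       (pvG rv N (m : Int)).2 ++ PySem.List.pyGetD rv (k : Int) "") := by
  have hcast : (2:Int) ^ k + (m : Int) = ((2 ^ k + m : Nat) : Int) := by push_cast; ring
  rw [hcast, pvGRestrict rv N m k hm hk.le]
  set c := (PySem.List.pyRange 0 (k : Int)).foldl (pvStep rv (m : Int)) ("", "") with hc
  have hsplit : PySem.List.pyRange 0 (N : Int) =
      PySem.List.pyRange 0 (k : Int) ++ ((k : Int) :: PySem.List.pyRange ((k : Int) + 1) (N : Int)) := by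
    have hcons : PySem.List.pyRange (k : Int) (N : Int) = (k : Int) :: PySem.List.pyRange ((k : Int) + 1) (N : Int) :=
      PySem.List.pyRange_one_cons (by exact_mod_cast hk)
    rw [PySem.List.pyRange_one_append 0 (k : Int) (N : Int) (by positivity) (by exact_mod_cast hk.le), hcons]
  unfold pvG
  rw [hsplit, List.foldl_append]
  -- the first k steps of 2^k + m equal those of m
  have hlow : (PySem.List.pyRange 0 (k : Int)).foldl (pvStep rv ((2 ^ k + m : Nat) : Int)) ("", "") = c := by
    rw [hc]
    apply PySem.List.foldl_congr_mem
    intro acc j hj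
    have hj' := PySem.List.mem_pyRange_one.mp hj
    have hjk : j.toNat < k := by omega
    have hband : PySem.Int.band ((2 ^ k + m : Nat) : Int) ((1:Int) <<< j.toNat)
        = PySem.Int.band ((m : Nat) : Int) ((1:Int) <<< j.toNat) := by
      rw [pvBandNat, pvBandNat, Nat.and_two_pow, Nat.and_two_pow,
        Nat.testBit_two_pow_add_gt hjk]
    simp only [pvStep, hband]
  rw [hlow, List.foldl_cons]
  -- the step at bit k fires
  have hbit : (2 ^ k + m).testBit k = true := by
    rw [Nat.testBit_two_pow_add_eq, Nat.testBit_lt_two_pow hm]; rfl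
  have hstep : pvStep rv ((2 ^ k + m : Nat) : Int) c (k : Int)
      = (c.1 ++ pvVar (k : Int), c.2 ++ PySem.List.pyGetD rv (k : Int) "") := by
    unfold pvStep
    rw [if_pos]
    have h0 : ((k : Int)).toNat = k := by omega
    rw [h0]
    exact pvBandTrue _ _ hbit
  rw [hstep]
  -- the tail beyond bit k does nothing (2^k + m < 2^(k+1))
  have htail := pvHighZero rv (2 ^ k + m) (k + 1) (N : Int)
    (by have := Nat.pow_succ 2 k; omega)
    (c.1 ++ pvVar (k : Int), c.2 ++ PySem.List.pyGetD rv (k : Int) "")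
  have hcast2 : ((k + 1 : Nat) : Int) = (k : Int) + 1 := by push_cast; ring
  rw [hcast2] at htail
  rw [htail]

-- all of A's masks 1 .. 2^k - 1, in order, give pvC
theorem pvMain (rv : List String) (N k : Nat) (hk : k ≤ N) :
    (PySem.List.pyRange 1 ((2:Int) ^ k)).map (pvG rv N) = pvC rv k := by
  induction k with
  | zero => simp [PySem.List.pyRange_one_eq_nil, pvC]
  | succ k ih =>
    have hk' : k ≤ N := by omega
    have h1 : (1:Int) ≤ (2:Int) ^ k := one_le_pow₀ (by norm_num)
    have h2 : (2:Int) ^ k ≤ (2:Int) ^ (k + 1) := by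
      have : (0:Int) < 2 ^ k := by positivity
      rw [pow_succ]; omega
    rw [PySem.List.pyRange_one_append 1 ((2:Int) ^ k) ((2:Int) ^ (k + 1)) h1 h2,
      List.map_append, ih hk']
    -- the upper half
    have hlen : ((2:Int) ^ (k + 1) - (2:Int) ^ k).toNat = 2 ^ k := by
      rw [pow_succ]
      have h3 : ((2:Int) ^ k) = ((2 ^ k : Nat) : Int) := by push_cast; ring
      omega
    rw [PySem.List.pyRange_one ((2:Int) ^ k) ((2:Int) ^ (k + 1)), hlen, List.map_map]
    have hrs : 2 ^ k = (2 ^ k - 1) + 1 := by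
      have := Nat.one_le_two_pow (n := k); omega
    -- pvC rv k as a mapped range
    have hC : pvC rv k = (List.range (2 ^ k - 1)).map (fun (s : Nat) => pvG rv N (1 + (s : Int))) := by
      rw [← ih hk', PySem.List.pyRange_one 1 ((2:Int) ^ k)]
      have h4 : ((2:Int) ^ k - 1).toNat = 2 ^ k - 1 := by
        have h3 : ((2:Int) ^ k) = ((2 ^ k : Nat) : Int) := by push_cast; ring
        omega
      rw [h4, List.map_map]
      simp [Function.comp_def]
    have hup : (List.range (2 ^ k)).map (pvG rv N ∘ (fun (t : Nat) => (2:Int) ^ k + (t : Int)))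
        = (pvVar (k : Int), PySem.List.pyGetD rv (k : Int) "")
            :: (pvC rv k).map (fun p => (p.1 ++ pvVar (k : Int), p.2 ++ PySem.List.pyGetD rv (k : Int) "")) := by
      rw [hrs, List.range_succ_eq_map, List.map_cons, List.map_map]
      have hmap : ∀ s ∈ List.range (2 ^ k - 1),
          ((pvG rv N ∘ fun (t : Nat) => (2:Int) ^ k + (t : Int)) ∘ Nat.succ) s
            = ((fun p => (p.1 ++ pvVar (k : Int), p.2 ++ PySem.List.pyGetD rv (k : Int) "")) ∘ fun (s : Nat) => pvG rv N (1 + (s : Int))) s := by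
        intro s hs
        have hs' : s < 2 ^ k - 1 := List.mem_range.mp hs
        have e1 : ((Nat.succ s : Nat) : Int) = ((1 + s : Nat) : Int) := by push_cast; ring
        have e2 : (1 : Int) + (s : Int) = ((1 + s : Nat) : Int) := by push_cast; ring
        simp only [Function.comp_apply, e1, e2]
        exact pvKey rv N (1 + s) k (by omega) (by omega)
      rw [List.map_congr_left hmap, ← List.map_map, ← hC]
      have hhead : pvG rv N ((2:Int) ^ k + ((0 : Nat) : Int)) = (pvVar (k : Int), PySem.List.pyGetD rv (k : Int) "") := by
        rw [pvKey rv N 0 k (by positivity) (by omega)]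
        norm_num [pvGZero]
      simp only [Function.comp_apply]
      rw [hhead]
    rw [hup]
    simp [pvC]

-- B's loop builds exactly pvC, flattened into two-element lists
theorem pvBLoop (rv : List String) (k : Nat) :
    (PySem.List.pyRange 0 (k : Int)).foldl (fun combos j =>
        combos ++ [["x" ++ PySem.Int.toStr (j + 1), PySem.List.pyGetD rv j ""]]
          ++ combos.map (fun p =>
            [PySem.List.pyGetD p 0 "" ++ ("x" ++ PySem.Int.toStr (j + 1)),
             PySem.List.pyGetD p 1 "" ++ PySem.List.pyGetD rv j ""])) []
      = (pvC rv k).map (fun p => [p.1, p.2]) := by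
  induction k with
  | zero => simp [PySem.List.pyRange_one_eq_nil, pvC]
  | succ k ih =>
    have hcast : ((k + 1 : Nat) : Int) = (k : Int) + 1 := by push_cast; ring
    rw [hcast, PySem.List.pyRange_one_succ_right (by positivity), List.foldl_append, ih]
    simp only [List.foldl_cons, List.foldl_nil, pvC, List.map_append, List.map_map]
    simp [pvVar, Function.comp_def, PySem.List.pyGetD_ofNat']

-- A's mask loop builds the same flattened list
theorem pvALoop (rv : List String) (N : Nat) :
    (PySem.List.pyRange 1 ((2:Int) ^ N)).foldl (fun acc i =>
        let p := (PySem.List.pyRange 0 (N : Int)).foldl (fun (cv : String × String) j =>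
          if PySem.Int.band i ((1:Int) <<< j.toNat) ≠ 0 then
            (cv.1 ++ PySem.List.pyGetD (((PySem.List.pyRange 0 (N : Int)).map (fun i => "x" ++ PySem.Int.toStr (i + 1))) : List String) j "",
             cv.2 ++ PySem.List.pyGetD rv j "")
          else cv) ("", "");
        acc ++ [[p.1, p.2]]) []
      = (pvC rv N).map (fun p => [p.1, p.2]) := by
  have hstep : ∀ (acc : List (List String)), ∀ i ∈ PySem.List.pyRange 1 ((2:Int) ^ N),
      (let p := (PySem.List.pyRange 0 (N : Int)).foldl (fun (cv : String × String) j =>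
          if PySem.Int.band i ((1:Int) <<< j.toNat) ≠ 0 then
            (cv.1 ++ PySem.List.pyGetD (((PySem.List.pyRange 0 (N : Int)).map (fun i => "x" ++ PySem.Int.toStr (i + 1))) : List String) j "",
             cv.2 ++ PySem.List.pyGetD rv j "")
          else cv) ("", "");
        acc ++ [[p.1, p.2]])
      = acc ++ [[(pvG rv N i).1, (pvG rv N i).2]] := by
    intro acc i _
    have hinner : (PySem.List.pyRange 0 (N : Int)).foldl (fun (cv : String × String) j =>
          if PySem.Int.band i ((1:Int) <<< j.toNat) ≠ 0 then
            (cv.1 ++ PySem.List.pyGetD (((PySem.List.pyRange 0 (N : Int)).map (fun i => "x" ++ PySem.Int.toStr (i + 1))) : List String) j "",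
             cv.2 ++ PySem.List.pyGetD rv j "")
          else cv) ("", "") = pvG rv N i := by
      unfold pvG
      apply PySem.List.foldl_congr_mem
      intro cv j hj
      have hj' := PySem.List.mem_pyRange_one.mp hj
      unfold pvStep pvVar
      rw [PySem.List.pyGetD_map_pyRange_of_nonneg _ _ _ _ hj'.1 hj'.2,
        Int.shiftLeft_natCast_right]
    simp only [hinner]
  rw [PySem.List.foldl_congr_mem _ _ _ _ hstep,
    PySem.List.foldl_append_singleton_eq_map (fun i => [(pvG rv N i).1, (pvG rv N i).2]),
    List.nil_append, ← pvMain rv N N le_rfl, List.map_map]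
  rfl

-- the two ports agree for every input (Pre_ marks where the Python A returns)
theorem pvPortsEq (n : Int) (rv : List String) :
    generate_boolean_permutations n rv = generate_boolean_permutations_alt n rv := by
  by_cases hn : 0 ≤ n
  · obtain ⟨N, rfl⟩ : ∃ N : Nat, n = (N : Int) := ⟨n.toNat, by omega⟩
    simp only [generate_boolean_permutations, generate_boolean_permutations_alt,
      Int.toNat_natCast]
    rw [pvALoop rv N, pvBLoop rv N]
  · have h1 : n.toNat = 0 := by omega
    have h2 : PySem.List.pyRange 0 n = [] := PySem.List.pyRange_one_eq_nil (by omega)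
    simp [generate_boolean_permutations, generate_boolean_permutations_alt, h1, h2,
      PySem.List.pyRange_one_eq_nil]

-- ===== VERDICT (by name: the statement is the Claim_ definition above) =====
theorem generate_boolean_permutations_spec : Claim_equal_generate_boolean_permutations := by
  intro n rv _ _
  exact pvPortsEq n rv
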